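-- pv_equiv track=rewrite | github.com/jaejae2374/CodingTest | 등대/solution.py | dfs
-- ===== SOURCE A (Python) =====
-- def dfs(cur, graph, visited):
--     visited[cur] = 1
--     nxt_nodes = [adj_n for adj_n in graph[cur] if visited[adj_n]==0]
--
--     active, inactive = 1, 0
--     if not nxt_nodes:
--         return active, inactive
--
--     for nxt in nxt_nodes:
--         nxt_active, nxt_inactive = dfs(nxt, graph, visited)
--         active += min(nxt_active, nxt_inactive)
--         inactive += nxt_active
--     return active, inactive
-- ===== SOURCE B (Python) =====
-- def dfs(cur, graph, visited):
--     def enter(n):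
--         visited[n] = 1
--         return [n, 1, 0, iter([m for m in graph[n] if visited[m] == 0])]
--     stack = [enter(cur)]
--     while True:
--         frame = stack[-1]
--         c = next(frame[3], None)
--         if c is not None:
--             stack.append(enter(c))
--         else:
--             stack.pop()
--             if not stack:
--                 return frame[1], frame[2]
--             top = stack[-1]
--             top[1] += min(frame[1], frame[2])
--             top[2] += frame[1]
-- ===== Notes on version B (the rewrite author's own statement) =====
-- stated objective: alternative
-- what changed: A's recursive DFS is replaced by an iterative post-order DFS with an explicit stack of frames (node, active, inactive, child-iterator), folding each popped child into its parent with active+=min(ca,ci), inactive+=ca; traversal order, children snapshots and the in-place visited marking are identical.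
-- outside the precondition, e.g. on dfs(0, {0: [], 1: [0, 2]}, [0, 0, 0]): A returns (1, 0), B returns (1, 0)
import Mathlib
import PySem

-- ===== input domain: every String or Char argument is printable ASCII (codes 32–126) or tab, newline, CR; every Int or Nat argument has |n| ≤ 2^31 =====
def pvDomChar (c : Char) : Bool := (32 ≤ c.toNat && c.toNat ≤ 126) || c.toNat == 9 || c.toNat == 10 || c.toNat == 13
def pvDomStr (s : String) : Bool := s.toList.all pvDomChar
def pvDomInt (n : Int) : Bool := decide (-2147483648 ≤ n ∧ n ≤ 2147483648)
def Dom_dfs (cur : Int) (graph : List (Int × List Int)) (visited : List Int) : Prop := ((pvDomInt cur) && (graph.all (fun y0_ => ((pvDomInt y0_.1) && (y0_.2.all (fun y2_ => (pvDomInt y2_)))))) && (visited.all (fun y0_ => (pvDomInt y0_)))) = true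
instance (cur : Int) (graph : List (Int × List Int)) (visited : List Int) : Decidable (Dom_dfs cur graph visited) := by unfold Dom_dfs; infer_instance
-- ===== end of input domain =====

-- B replaces A's recursion by an explicit-stack iterative post-order DFS (same traversal and the same
-- in-place visited marking as A; equivalence here is about the RETURN value — both Pythons mutate
-- `visited` identically); objective: alternative decomposition, no speed claim.

-- ===== PORT A =====
-- A's children snapshot: [adj_n for adj_n in graph[cur] if visited[adj_n]==0]
def pvSnapA (graph : List (Int × List Int)) (v : List Int) (n : Int) : List Int :=
  (((PySem.Dict.mk graph).get? n).getD []).filter (fun m => ((PySem.List.pyGet? v m).getD 1) == 0)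

-- A's recursion, fuel-guarded for totality (none = fuel exhausted; unreachable under Pre_),
-- threading the mutated `visited` list through the calls.
mutual
  def pvDfsA (graph : List (Int × List Int)) : Nat → Int → List Int → Option ((Int × Int) × List Int)
    | 0, _, _ => none
    | f + 1, cur, v =>
      let v1 := PySem.List.pySetD v cur 1          -- visited[cur] = 1
      let nxt := pvSnapA graph v1 cur              -- nxt_nodes
      if nxt = [] then some ((1, 0), v1)           -- if not nxt_nodes: return 1, 0
      else pvFoldA graph f nxt 1 0 v1              -- for nxt in nxt_nodes: ...
  termination_by f _ _ => (f, 0)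
  def pvFoldA (graph : List (Int × List Int)) : Nat → List Int → Int → Int → List Int → Option ((Int × Int) × List Int)
    | _, [], a, i, v => some ((a, i), v)
    | f, c :: cs, a, i, v =>
      match pvDfsA graph f c v with
      | none => none
      | some ((ca, ci), v') => pvFoldA graph f cs (a + min ca ci) (i + ca) v'
  termination_by f cs _ _ _ => (f, cs.length + 1)
end

def dfs (cur : Int) (graph : List (Int × List Int)) (visited : List Int) : Int × Int :=
  ((pvDfsA graph (2 * visited.length + 2) cur visited).getD ((1, 0), visited)).1

-- ===== PORT B =====
-- B's snapshot of the currently-unvisited neighbours (same expression B's `enter` computes)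
def pvSnapB (graph : List (Int × List Int)) (v : List Int) (n : Int) : List Int :=
  (((PySem.Dict.mk graph).get? n).getD []).filter (fun m => ((PySem.List.pyGet? v m).getD 1) == 0)

-- B's `enter`: mark the node, build its frame [n, 1, 0, children-iterator]
def pvEnterB (graph : List (Int × List Int)) (n : Int) (v : List Int) :
    (Int × Int × Int × List Int) × List Int :=
  let v' := PySem.List.pySetD v n 1
  ((n, 1, 0, pvSnapB graph v' n), v')

-- B's while-loop, one constructor step per iteration, fuel-guarded for totality
def pvStepB (graph : List (Int × List Int)) : Nat → List (Int × Int × Int × List Int) → List Int → Option (Int × Int)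
  | 0, _, _ => none
  | _ + 1, [], _ => none
  | g + 1, (node, a, i, c :: cs) :: rest, v =>      -- next(frame[3], None) is not None: push
    match pvEnterB graph c v with
    | (fr, v') => pvStepB graph g (fr :: (node, a, i, cs) :: rest) v'
  | g + 1, (_, a, i, []) :: rest, v =>              -- children exhausted: pop
    match rest with
    | [] => some (a, i)
    | (p, pa, pi, pcs) :: rest' => pvStepB graph g ((p, pa + min a i, pi + a, pcs) :: rest') v

def pvTotalAdj (graph : List (Int × List Int)) : Nat :=
  (graph.map (fun p => p.2.length)).sum

def dfs_alt (cur : Int) (graph : List (Int × List Int)) (visited : List Int) : Int × Int :=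
  match pvEnterB graph cur visited with
  | (fr, v1) =>
    (pvStepB graph ((pvTotalAdj graph + 2) ^ (2 * visited.length + 3) + 1) [fr] v1).getD (1, 0)

-- ===== PRECONDITION & SPEC =====
-- Pre_ excludes the inputs on which A raises (cur an invalid index of visited or not a key of graph;
-- an adjacency entry that is an invalid index, or an initially-unvisited adjacency entry missing from
-- graph), constraining only adjacency lists A can read: those of cur and of initially-unvisited keys.
-- It is slightly narrower than "A returns": it also constrains such entries in parts of the graph
-- never reached from cur, on which A would return normally without touching them.
def Pre_dfs (cur : Int) (graph : List (Int × List Int)) (visited : List Int) : Prop :=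
  PySem.Raise.InRange visited.length cur ∧
  ((PySem.Dict.mk graph).get? cur).isSome = true ∧
  ∀ p ∈ graph, (p.1 = cur ∨ PySem.List.pyGet? visited p.1 = some 0) →
    ∀ j ∈ p.2, PySem.Raise.InRange visited.length j ∧
      (PySem.List.pyGet? visited j = some 0 → ((PySem.Dict.mk graph).get? j).isSome = true)
instance (cur : Int) (graph : List (Int × List Int)) (visited : List Int) : Decidable (Pre_dfs cur graph visited) := by
  unfold Pre_dfs; infer_instance

def pvWitness_dfs : Int × (List (Int × List Int)) × List Int := (0, [(0, [1]), (1, [])], [0, 0])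

def Spec_dfs (cur : Int) (graph : List (Int × List Int)) (visited : List Int) (out : Int × Int) : Prop := out = dfs_alt cur graph visited
instance (cur : Int) (graph : List (Int × List Int)) (visited : List Int) (out : Int × Int) : Decidable (Spec_dfs cur graph visited out) := by unfold Spec_dfs; infer_instance

-- ===== CLAIM (what is proved, stated in full; the proofs are below) =====
def Claim_equal_dfs : Prop := ∀ (cur : Int) (graph : List (Int × List Int)) (visited : List Int), Dom_dfs cur graph visited → Pre_dfs cur graph visited → Spec_dfs cur graph visited (dfs cur graph visited)

-- ===== LEMMAS AND PROOFS =====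

theorem pv_witness_ok : Dom_dfs pvWitness_dfs.1 pvWitness_dfs.2.1 pvWitness_dfs.2.2 ∧ Pre_dfs pvWitness_dfs.1 pvWitness_dfs.2.1 pvWitness_dfs.2.2 := by decide


-- ----- index/access helpers -----
def pvIdx (n : Nat) (i : Int) : Nat := if 0 ≤ i then i.toNat else n - (-i).toNat

theorem pvIdx?_eq (n : Nat) (i : Int) (h : PySem.Raise.InRange n i) :
    PySem.List.pyIdx? n i = some (pvIdx n i) := by
  obtain ⟨h1, h2⟩ := h
  unfold PySem.List.pyIdx? pvIdx
  split_ifs <;> first | rfl | omega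

theorem pvGet_eq (w : List Int) (n : Nat) (i : Int) (hl : w.length = n)
    (h : PySem.Raise.InRange n i) : PySem.List.pyGet? w i = w[pvIdx n i]? := by
  unfold PySem.List.pyGet?
  rw [hl, pvIdx?_eq n i h]
  rfl

theorem pvSet_eq (w : List Int) (n : Nat) (i : Int) (hl : w.length = n)
    (h : PySem.Raise.InRange n i) : PySem.List.pySetD w i 1 = w.set (pvIdx n i) 1 := by
  unfold PySem.List.pySetD PySem.List.pySet?
  rw [hl, pvIdx?_eq n i h]
  rfl

-- ----- pointwise "visited evolves by setting slots to 1" relation and the zero count -----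
def pvZ (w : List Int) : Nat := w.countP (fun x => x == 0)

def pvPW : List Int → List Int → Prop
  | [], [] => True
  | x :: xs, y :: ys => (y = x ∨ y = 1) ∧ pvPW xs ys
  | _, _ => False

theorem pvPW_refl : ∀ a : List Int, pvPW a a
  | [] => trivial
  | _ :: xs => ⟨Or.inl rfl, pvPW_refl xs⟩

theorem pvPW_trans : ∀ {a b c : List Int}, pvPW a b → pvPW b c → pvPW a c
  | [], [], [], _, _ => trivial
  | _ :: _, _ :: _, _ :: _, ⟨h1, t1⟩, ⟨h2, t2⟩ => by
    refine ⟨?_, pvPW_trans t1 t2⟩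
    rcases h2 with h2 | h2 <;> rcases h1 with h1 | h1 <;> simp [h1, h2]

theorem pvPW_length : ∀ {a b : List Int}, pvPW a b → a.length = b.length
  | [], [], _ => rfl
  | _ :: _, _ :: _, ⟨_, t⟩ => by simpa using pvPW_length t

theorem pvPW_get : ∀ {a b : List Int}, pvPW a b → ∀ k : Nat, b[k]? = a[k]? ∨ b[k]? = some 1
  | [], [], _, k => Or.inl rfl
  | x :: xs, y :: ys, ⟨h, t⟩, 0 => by rcases h with h | h <;> simp [h]
  | x :: xs, y :: ys, ⟨h, t⟩, (k+1) => by simpa using pvPW_get t k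

theorem pvPW_zero_back {a b : List Int} (h : pvPW a b) {k : Nat} (hz : b[k]? = some 0) :
    a[k]? = some 0 := by
  rcases pvPW_get h k with hk | hk
  · rw [← hk, hz]
  · rw [hk] at hz; simp at hz

theorem pvPW_set_one : ∀ (a b : List Int) (n : Nat), pvPW a b → pvPW a (b.set n 1)
  | [], [], _, _ => trivial
  | x :: xs, y :: ys, 0, ⟨_, t⟩ => ⟨Or.inr rfl, t⟩
  | x :: xs, y :: ys, (n+1), ⟨h, t⟩ => ⟨h, pvPW_set_one xs ys n t⟩

theorem pvPW_set_self (w : List Int) (n : Nat) : pvPW w (w.set n 1) :=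
  pvPW_set_one w w n (pvPW_refl w)

theorem pvZ_le : ∀ {a b : List Int}, pvPW a b → pvZ b ≤ pvZ a
  | [], [], _ => le_refl _
  | x :: xs, y :: ys, ⟨h, t⟩ => by
    have ih := pvZ_le t
    simp only [pvZ, List.countP_cons] at ih ⊢
    rcases h with h | h <;> subst h
    · split_ifs <;> omega
    · norm_num
      split_ifs <;> omega

theorem pvZ_lt : ∀ {a b : List Int}, pvPW a b → ∀ k : Nat, a[k]? = some 0 → b[k]? = some 1 →
    pvZ b < pvZ a
  | x :: xs, y :: ys, ⟨h, t⟩, 0, ha, hb => by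
    simp at ha hb
    have ih := pvZ_le t
    simp only [pvZ, List.countP_cons] at ih ⊢
    subst ha; subst hb
    simp
    omega
  | x :: xs, y :: ys, ⟨h, t⟩, (k+1), ha, hb => by
    simp at ha hb
    have ih := pvZ_lt t k ha hb
    simp only [pvZ, List.countP_cons] at ih ⊢
    rcases h with h | h <;> subst h
    · split_ifs <;> omega
    · norm_num
      split_ifs <;> omega

theorem pvZ_set_zero : ∀ (w : List Int) (n : Nat), w[n]? = some 0 →
    pvZ (w.set n 1) + 1 = pvZ w
  | x :: xs, 0, h => by
    simp at h
    simp [pvZ, List.countP_cons, h]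
  | x :: xs, (n+1), h => by
    simp at h
    have ih := pvZ_set_zero xs n h
    simp only [List.set, pvZ, List.countP_cons] at ih ⊢
    split_ifs <;> omega
  | [], n, h => by simp at h

theorem pvZ_set_nonzero : ∀ (w : List Int) (n : Nat), ¬ (w[n]? = some 0) →
    pvZ (w.set n 1) = pvZ w
  | [], n, _ => by simp
  | x :: xs, 0, h => by
    simp at h
    simp [pvZ, List.countP_cons, h]
  | x :: xs, (n+1), h => by
    simp at h
    have ih := pvZ_set_nonzero xs n (by simpa using h)
    simp only [List.set, pvZ, List.countP_cons] at ih ⊢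
    omega

-- ----- graph lookup facts -----
theorem pvGraphGet_mem : ∀ (graph : List (Int × List Int)) (k : Int) (adj : List Int),
    (PySem.Dict.mk graph).get? k = some adj → (k, adj) ∈ graph
  | [], k, adj, h => by simp [PySem.Dict.get?] at h
  | (k0, v0) :: rest, k, adj, h => by
    rw [PySem.Dict.get?_mk_cons] at h
    split_ifs at h with hk
    · simp at h hk
      simp [hk, h]
    · exact List.mem_cons_of_mem _ (pvGraphGet_mem rest k adj h)

theorem pvAdjLen_le : ∀ (graph : List (Int × List Int)) (k : Int) (adj : List Int),
    (k, adj) ∈ graph → adj.length ≤ pvTotalAdj graph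
  | (k0, v0) :: rest, k, adj, h => by
    rcases List.mem_cons.1 h with h | h
    · simp at h
      simp [pvTotalAdj, h.2]
    · have := pvAdjLen_le rest k adj h
      simp [pvTotalAdj] at *
      omega

theorem pvSnap_len_le (graph : List (Int × List Int)) (v : List Int) (n : Int) :
    (pvSnapA graph v n).length ≤ pvTotalAdj graph := by
  unfold pvSnapA
  cases h : (PySem.Dict.mk graph).get? n with
  | none => simp
  | some adj =>
    calc (adj.filter _).length ≤ adj.length := List.length_filter_le _ _
    _ ≤ _ := pvAdjLen_le graph n adj (pvGraphGet_mem graph n adj h)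

theorem pvSnap_mem {graph : List (Int × List Int)} {v : List Int} {n c : Int}
    (h : c ∈ pvSnapA graph v n) :
    ∃ adj, (PySem.Dict.mk graph).get? n = some adj ∧ c ∈ adj ∧ PySem.List.pyGet? v c = some 0 := by
  unfold pvSnapA at h
  cases hg : (PySem.Dict.mk graph).get? n with
  | none => rw [hg] at h; simp at h
  | some adj =>
    rw [hg] at h
    simp only [Option.getD_some, List.mem_filter] at h
    refine ⟨adj, rfl, h.1, ?_⟩
    cases hv : PySem.List.pyGet? v c with
    | none => rw [hv] at h; simp at h
    | some x =>
      rw [hv] at h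
      have : x = 0 := by simpa using h.2
      rw [this]

def pvBit (w : List Int) (cur : Int) : Nat :=
  if PySem.List.pyGet? w cur = some 0 then 0 else 1

-- ----- totality of A's recursion under Pre_ -----
theorem pvFOLDTOT (graph : List (Int × List Int)) (L : Nat) (v0 : List Int) (hv0 : v0.length = L)
    (cur0 : Int) (f : Nat)
    (IH : ∀ (cur : Int) (w : List Int), w.length = L → pvPW v0 w →
      (cur = cur0 ∨ PySem.List.pyGet? v0 cur = some 0) →
      PySem.Raise.InRange L cur → ((PySem.Dict.mk graph).get? cur).isSome = true →
      2 * pvZ w + pvBit w cur < f →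
      ∃ a i w2, pvDfsA graph f cur w = some ((a, i), w2) ∧ w2.length = L ∧ pvPW w w2)
    (v1 : List Int) (hv1L : v1.length = L) (hv01 : pvPW v0 v1)
    (hbudget : 2 * pvZ v1 + 1 ≤ f) :
    ∀ (cs : List Int) (a i : Int) (w : List Int),
      (∀ c ∈ cs, PySem.Raise.InRange L c ∧ ((PySem.Dict.mk graph).get? c).isSome = true ∧
        PySem.List.pyGet? v1 c = some 0) →
      w.length = L → pvPW v1 w →
      ∃ a2 i2 w2, pvFoldA graph f cs a i w = some ((a2, i2), w2) ∧ w2.length = L ∧ pvPW w w2 := by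
  intro cs
  induction cs with
  | nil =>
    intro a i w _ hwL hpw
    exact ⟨a, i, w, by simp [pvFoldA], hwL, pvPW_refl w⟩
  | cons c cs ihcs =>
    intro a i w hcs hwL hpw
    obtain ⟨hcr, hck, hcz⟩ := hcs c (List.mem_cons_self)
    -- fuel budget for the child call
    have hv1c : v1[pvIdx L c]? = some 0 := by rw [← pvGet_eq v1 L c hv1L hcr]; exact hcz
    have hbit : 2 * pvZ w + pvBit w c < f := by
      have hle := pvZ_le hpw
      rcases pvPW_get hpw (pvIdx L c) with hk | hk
      · have : PySem.List.pyGet? w c = some 0 := by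
          rw [pvGet_eq w L c hwL hcr, hk]; exact hv1c
        simp [pvBit, this]; omega
      · have hlt := pvZ_lt hpw (pvIdx L c) hv1c hk
        simp [pvBit]; split_ifs <;> omega
    have hc0 : PySem.List.pyGet? v0 c = some 0 := by
      have h1 : v1[pvIdx L c]? = some 0 := hv1c
      have h0 : v0[pvIdx L c]? = some 0 := pvPW_zero_back hv01 h1
      rw [pvGet_eq v0 L c hv0 hcr]; exact h0
    obtain ⟨ca, ci, w', hdfs, hw'L, hpw'⟩ :=
      IH c w hwL (pvPW_trans hv01 hpw) (Or.inr hc0) hcr hck hbit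
    obtain ⟨a2, i2, w2, hfold, hw2L, hpw2⟩ :=
      ihcs (a + min ca ci) (i + ca) w'
        (fun d hd => hcs d (List.mem_cons_of_mem _ hd)) hw'L (pvPW_trans hpw hpw')
    refine ⟨a2, i2, w2, ?_, hw2L, pvPW_trans hpw' hpw2⟩
    rw [pvFoldA, hdfs]
    exact hfold

theorem pvTOT (graph : List (Int × List Int)) (L : Nat) (v0 : List Int)
    (hv0 : v0.length = L) (cur0 : Int)
    (GG : ∀ p ∈ graph, (p.1 = cur0 ∨ PySem.List.pyGet? v0 p.1 = some 0) →
      ∀ j ∈ p.2, PySem.Raise.InRange L j ∧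
      (PySem.List.pyGet? v0 j = some 0 → ((PySem.Dict.mk graph).get? j).isSome = true)) :
    ∀ (f : Nat) (cur : Int) (w : List Int), w.length = L → pvPW v0 w →
      (cur = cur0 ∨ PySem.List.pyGet? v0 cur = some 0) →
      PySem.Raise.InRange L cur → ((PySem.Dict.mk graph).get? cur).isSome = true →
      2 * pvZ w + pvBit w cur < f →
      ∃ a i w2, pvDfsA graph f cur w = some ((a, i), w2) ∧ w2.length = L ∧ pvPW w w2 := by
  intro f
  induction f with
  | zero => intro cur w _ _ _ _ _ h; omega
  | succ f ihf =>
    intro cur w hwL hpw hcur hcr hck hfuel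
    have hset : PySem.List.pySetD w cur 1 = w.set (pvIdx L cur) 1 := pvSet_eq w L cur hwL hcr
    set n := pvIdx L cur with hn
    set v1 := w.set n 1 with hv1
    have hv1L : v1.length = L := by simp [hv1, hwL]
    have hpwv1 : pvPW w v1 := pvPW_set_self w n
    have hpw01 : pvPW v0 v1 := pvPW_trans hpw hpwv1
    have hgw : PySem.List.pyGet? w cur = w[n]? := pvGet_eq w L cur hwL hcr
    have hbudget : 2 * pvZ v1 + 1 ≤ f := by
      by_cases h0 : w[n]? = some 0
      · have hz := pvZ_set_zero w n h0
        rw [← hv1] at hz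
        have : pvBit w cur = 0 := by simp [pvBit, hgw, h0]
        omega
      · have hz := pvZ_set_nonzero w n h0
        rw [← hv1] at hz
        have : pvBit w cur = 1 := by simp [pvBit, hgw, h0]
        omega
    by_cases hnil : pvSnapA graph v1 cur = []
    · refine ⟨1, 0, v1, ?_, hv1L, hpwv1⟩
      rw [pvDfsA]
      simp only [← hset] at hnil ⊢
      simp [hnil]
    · have hcs : ∀ c ∈ pvSnapA graph v1 cur,
          PySem.Raise.InRange L c ∧ ((PySem.Dict.mk graph).get? c).isSome = true ∧
          PySem.List.pyGet? v1 c = some 0 := by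
        intro c hc
        obtain ⟨adj, hadj, hcadj, hcz⟩ := pvSnap_mem hc
        obtain ⟨hjr, hjk⟩ := GG (cur, adj) (pvGraphGet_mem graph cur adj hadj) hcur c hcadj
        refine ⟨hjr, hjk ?_, hcz⟩
        have h1 : v1[pvIdx L c]? = some 0 := by rw [← pvGet_eq v1 L c hv1L hjr]; exact hcz
        have h0 : v0[pvIdx L c]? = some 0 := pvPW_zero_back hpw01 h1
        rw [pvGet_eq v0 L c hv0 hjr]; exact h0
      obtain ⟨a2, i2, w2, hfold, hw2L, hpw2⟩ :=
        pvFOLDTOT graph L v0 hv0 cur0 f ihf v1 hv1L hpw01 hbudget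
          (pvSnapA graph v1 cur) 1 0 v1 hcs hv1L (pvPW_refl v1)
      refine ⟨a2, i2, w2, ?_, hw2L, pvPW_trans hpwv1 hpw2⟩
      rw [pvDfsA]
      simp only [← hset] at hnil hfold ⊢
      simp [hnil, hfold]

-- ----- fuel monotonicity of B's machine -----
theorem pvMono (graph : List (Int × List Int)) :
    ∀ (g : Nat) (s : List (Int × Int × Int × List Int)) (v : List Int) (r : Int × Int),
      pvStepB graph g s v = some r → pvStepB graph (g + 1) s v = some r := by
  intro g
  induction g with
  | zero => intro s v r h; simp [pvStepB] at h
  | succ g ihg =>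
    intro s v r h
    match s with
    | [] => simp [pvStepB] at h
    | (node, a, i, c :: cs) :: rest =>
      rw [pvStepB] at h ⊢
      exact ihg _ _ _ h
    | (node, a, i, ([] : List Int)) :: rest =>
      match rest with
      | [] => exact h
      | (p, pa, pi, pcs) :: rest' =>
        rw [pvStepB] at h ⊢
        exact ihg _ _ _ h

theorem pvMonoLe (graph : List (Int × List Int))
    {g g' : Nat} (hle : g ≤ g') (s : List (Int × Int × Int × List Int)) (v : List Int)
    (r : Int × Int) (h : pvStepB graph g s v = some r) : pvStepB graph g' s v = some r := by
  induction g', hle using Nat.le_induction with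
  | base => exact h
  | succ g' _ ih => exact pvMono graph g' s v r ih

def pvS1 (graph : List (Int × List Int)) (f : Nat) : Nat := (pvTotalAdj graph + 2) ^ (f + 1)

theorem pvS1_bound (graph : List (Int × List Int)) (f m : Nat) (hm : m ≤ pvTotalAdj graph) :
    m * (pvS1 graph f + 2) ≤ pvS1 graph (f + 1) := by
  have h1 : pvTotalAdj graph + 2 ≤ (pvTotalAdj graph + 2) ^ (f + 1) :=
    Nat.le_self_pow (by omega) _
  unfold pvS1
  rw [pow_succ (pvTotalAdj graph + 2) (f + 1)]
  nlinarith [h1, hm]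

-- ----- simulation: B's machine computes A's recursion -----
theorem pvSIM2 (graph : List (Int × List Int)) (f : Nat)
    (IH1 : ∀ (cur : Int) (v : List Int) (a i : Int) (v2 : List Int),
      pvDfsA graph f cur v = some ((a, i), v2) →
      ∀ (rest : List (Int × Int × Int × List Int)) (g0 : Nat) (r : Int × Int),
        pvStepB graph g0 ((cur, a, i, ([] : List Int)) :: rest) v2 = some r →
        pvStepB graph (g0 + pvS1 graph f)
          ((cur, 1, 0, pvSnapB graph (PySem.List.pySetD v cur 1) cur) :: rest)
          (PySem.List.pySetD v cur 1) = some r) :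
    ∀ (cs : List Int) (a i : Int) (v : List Int) (node a2 i2 : Int) (v2 : List Int)
      (rest : List (Int × Int × Int × List Int)) (g0 : Nat) (r : Int × Int),
      pvFoldA graph f cs a i v = some ((a2, i2), v2) →
      pvStepB graph g0 ((node, a2, i2, ([] : List Int)) :: rest) v2 = some r →
      pvStepB graph (g0 + cs.length * (pvS1 graph f + 2)) ((node, a, i, cs) :: rest) v = some r := by
  intro cs
  induction cs with
  | nil =>
    intro a i v node a2 i2 v2 rest g0 r hfold hstep
    rw [pvFoldA] at hfold
    simp at hfold
    obtain ⟨⟨ha, hi⟩, hv⟩ := hfold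
    subst ha; subst hi; subst hv
    simpa using hstep
  | cons c cs ihcs =>
    intro a i v node a2 i2 v2 rest g0 r hfold hstep
    rw [pvFoldA] at hfold
    cases h1 : pvDfsA graph f c v with
    | none => rw [h1] at hfold; simp at hfold
    | some res =>
      obtain ⟨⟨ca, ci⟩, vm⟩ := res
      rw [h1] at hfold
      simp only at hfold
      have P1 := ihcs (a + min ca ci) (i + ca) vm node a2 i2 v2 rest g0 r hfold hstep
      have P2 : pvStepB graph (g0 + cs.length * (pvS1 graph f + 2) + 1)
          ((c, ca, ci, ([] : List Int)) :: (node, a, i, cs) :: rest) vm = some r := by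
        rw [pvStepB]
        exact P1
      have P3 := IH1 c v ca ci vm h1 ((node, a, i, cs) :: rest)
        (g0 + cs.length * (pvS1 graph f + 2) + 1) r P2
      have P4 : pvStepB graph (g0 + cs.length * (pvS1 graph f + 2) + 1 + pvS1 graph f + 1)
          ((node, a, i, c :: cs) :: rest) v = some r := by
        rw [pvStepB]
        simp only [pvEnterB]
        exact P3
      have harith : g0 + cs.length * (pvS1 graph f + 2) + 1 + pvS1 graph f + 1 =
          g0 + (c :: cs).length * (pvS1 graph f + 2) := by
        simp [List.length_cons]; ring
      rw [harith] at P4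
      exact P4

theorem pvSIM1 (graph : List (Int × List Int)) :
    ∀ (f : Nat) (cur : Int) (v : List Int) (a i : Int) (v2 : List Int),
      pvDfsA graph f cur v = some ((a, i), v2) →
      ∀ (rest : List (Int × Int × Int × List Int)) (g0 : Nat) (r : Int × Int),
        pvStepB graph g0 ((cur, a, i, ([] : List Int)) :: rest) v2 = some r →
        pvStepB graph (g0 + pvS1 graph f)
          ((cur, 1, 0, pvSnapB graph (PySem.List.pySetD v cur 1) cur) :: rest)
          (PySem.List.pySetD v cur 1) = some r := by
  intro f
  induction f with
  | zero => intro cur v a i v2 h; rw [pvDfsA] at h; simp at h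
  | succ f ihf =>
    intro cur v a i v2 h rest g0 r hstep
    simp only [pvDfsA] at h
    have hsnap : pvSnapB graph (PySem.List.pySetD v cur 1) cur
        = pvSnapA graph (PySem.List.pySetD v cur 1) cur := rfl
    by_cases hnil : pvSnapA graph (PySem.List.pySetD v cur 1) cur = []
    · rw [if_pos hnil] at h
      simp at h
      obtain ⟨⟨ha, hi⟩, hv⟩ := h
      subst ha; subst hi; subst hv
      rw [hsnap, hnil]
      exact pvMonoLe graph (Nat.le_add_right _ _) _ _ _ hstep
    · rw [if_neg hnil] at h
      have hsim := pvSIM2 graph f ihf (pvSnapA graph (PySem.List.pySetD v cur 1) cur)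
        1 0 (PySem.List.pySetD v cur 1) cur a i v2 rest g0 r h hstep
      rw [hsnap]
      refine pvMonoLe graph ?_ _ _ _ hsim
      have hlen := pvSnap_len_le graph (PySem.List.pySetD v cur 1) cur
      have := pvS1_bound graph f _ hlen
      simp only [pvS1] at *
      omega

-- ===== VERDICT (by name: the statement is the Claim_ definition above) =====
theorem dfs_spec : Claim_equal_dfs := by
  unfold Claim_equal_dfs
  intro cur graph visited _ hpre
  obtain ⟨hcr, hck, GG⟩ := hpre
  have hz : pvZ visited ≤ visited.length := List.countP_le_length
  have hbit : pvBit visited cur ≤ 1 := by unfold pvBit; split_ifs <;> omega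
  obtain ⟨a, i, v2, hdfs, _, _⟩ :=
    pvTOT graph visited.length visited rfl cur GG (2 * visited.length + 2) cur visited rfl
      (pvPW_refl visited) (Or.inl rfl) hcr hck (by omega)
  have hA : dfs cur graph visited = (a, i) := by
    unfold dfs
    rw [hdfs]
    rfl
  have H0 : pvStepB graph 1 [(cur, a, i, ([] : List Int))] v2 = some (a, i) := by
    rw [pvStepB]
  have H1 := pvSIM1 graph (2 * visited.length + 2) cur visited a i v2 hdfs [] 1 (a, i) H0
  have hB : dfs_alt cur graph visited = (a, i) := by
    unfold dfs_alt
    simp only [pvEnterB]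
    have hfuel : (pvTotalAdj graph + 2) ^ (2 * visited.length + 3) + 1
        = 1 + pvS1 graph (2 * visited.length + 2) := by
      simp [pvS1]; ring
    rw [hfuel, H1]
    rfl
  unfold Spec_dfs
  rw [hA, hB]
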